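-- pv_equiv track=rewrite | github.com/hidaroz/project-medusa | project-medusa/medusa-cli/src/agents/ai_agent.py | _calculate_data_value
-- ===== SOURCE A (Python) =====
-- from typing import Dict, List, Optional, Any
--
-- def _calculate_data_value(data: List[Dict[str, Any]]) -> float:
--     """Calculate estimated value of extracted data"""
--     base_value = 0
--     for record in data:
--         if record["type"] == "medical_data":
--             base_value += 1500
--         elif record["type"] == "financial_data":
--             base_value += 1000
--         elif record["type"] == "credentials":
--             base_value += 500
--         elif record["type"] == "personal_files":
--             base_value += 100
--         else:
--             base_value += 50
--
--     return base_value
-- ===== SOURCE B (Python) =====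
-- def _calculate_data_value(data):
--     """Calculate estimated value of extracted data (tally-then-weighted-sum)."""
--     value_map = {
--         "medical_data": 1500,
--         "financial_data": 1000,
--         "credentials": 500,
--         "personal_files": 100,
--     }
--     counts = {}
--     for record in data:
--         t = record["type"]
--         counts[t] = counts.get(t, 0) + 1
--     return sum(cnt * value_map.get(t, 50) for t, cnt in counts.items())
-- ===== Notes on version B (the rewrite author's own statement) =====
-- stated objective: alternative
-- what changed: Replaces the per-record if/elif accumulation with building a frequency table of record types first and then summing count * weight over the distinct types via a weight dict with default 50.
import Mathlib
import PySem

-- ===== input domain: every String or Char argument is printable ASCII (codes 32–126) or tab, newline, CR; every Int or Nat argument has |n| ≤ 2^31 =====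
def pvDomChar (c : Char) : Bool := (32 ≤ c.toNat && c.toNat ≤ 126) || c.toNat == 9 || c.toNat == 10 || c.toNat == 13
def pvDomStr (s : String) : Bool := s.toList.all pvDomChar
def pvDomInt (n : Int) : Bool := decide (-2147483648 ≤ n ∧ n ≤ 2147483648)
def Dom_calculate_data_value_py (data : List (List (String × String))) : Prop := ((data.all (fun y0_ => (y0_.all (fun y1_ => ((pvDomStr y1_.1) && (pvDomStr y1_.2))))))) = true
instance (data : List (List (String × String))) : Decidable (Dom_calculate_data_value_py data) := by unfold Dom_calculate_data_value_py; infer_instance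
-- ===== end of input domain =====

-- B replaces A's per-record if/elif accumulation by a tally of the record types followed by
-- a weighted sum over the distinct types; equal values proved on all inputs where A returns.

-- ===== PORT A =====
-- record["type"]; under Pre_ the key is present, so the default is never used
def calculate_data_value_py (data : List (List (String × String))) : Int :=
  data.foldl (fun base_value record =>
    let t := (PySem.Dict.mk record).getD "type" ""
    if t = "medical_data" then base_value + 1500
    else if t = "financial_data" then base_value + 1000
    else if t = "credentials" then base_value + 500
    else if t = "personal_files" then base_value + 100
    else base_value + 50) 0

-- ===== PORT B =====
def pvValueMap : PySem.Dict String Int :=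
  PySem.Dict.ofList [("medical_data", 1500), ("financial_data", 1000), ("credentials", 500), ("personal_files", 100)]

def calculate_data_value_py_alt (data : List (List (String × String))) : Int :=
  let counts := data.foldl (fun d record =>
    let t := (PySem.Dict.mk record).getD "type" ""
    d.insert t (d.getD t 0 + 1)) PySem.Dict.empty
  counts.items.foldl (fun acc p => acc + p.2 * pvValueMap.getD p.1 50) 0

-- ===== PRECONDITION & SPEC =====
-- Pre_ excludes exactly the records without a "type" key, on which A raises KeyError.
def Pre_calculate_data_value_py (data : List (List (String × String))) : Prop :=
  ∀ record ∈ data, (PySem.Dict.mk record).contains "type" = true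
instance (data : List (List (String × String))) : Decidable (Pre_calculate_data_value_py data) := by unfold Pre_calculate_data_value_py; infer_instance

def pvWitness_calculate_data_value_py : (List (List (String × String))) :=
  [[("type", "medical_data")], [("type", "x")], [("type", "medical_data")]]

def Spec_calculate_data_value_py (data : List (List (String × String))) (out : Int) : Prop := out = calculate_data_value_py_alt data
instance (data : List (List (String × String))) (out : Int) : Decidable (Spec_calculate_data_value_py data out) := by unfold Spec_calculate_data_value_py; infer_instance

-- ===== CLAIM (what is proved, stated in full; the proofs are below) =====
def Claim_equal_calculate_data_value_py : Prop := ∀ (data : List (List (String × String))), Dom_calculate_data_value_py data → Pre_calculate_data_value_py data → Spec_calculate_data_value_py data (calculate_data_value_py data)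

-- ===== LEMMAS AND PROOFS =====

-- the weight A's if/elif chain assigns to a type string
def pvW (t : String) : Int :=
  if t = "medical_data" then 1500
  else if t = "financial_data" then 1000
  else if t = "credentials" then 500
  else if t = "personal_files" then 100
  else 50

lemma pvValueMap_getD (t : String) : pvValueMap.getD t 50 = pvW t := by
  by_cases h1 : t = "medical_data"; · subst h1; decide
  by_cases h2 : t = "financial_data"; · subst h2; decide
  by_cases h3 : t = "credentials"; · subst h3; decide
  by_cases h4 : t = "personal_files"; · subst h4; decide
  have hk : pvValueMap.keys = ["medical_data", "financial_data", "credentials", "personal_files"] := by decide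
  have hc : pvValueMap.contains t = false := by
    rw [PySem.Dict.contains_eq_decide_mem_keys, hk]; simp [h1, h2, h3, h4]
  rw [PySem.Dict.getD_of_not_contains pvValueMap 50 hc]
  simp [pvW, h1, h2, h3, h4]

-- moving one summand: nodup list, x a member, g' agrees with g off x
lemma pv_sum_update (x : String) (g g' : String → Int) {s : List String} (hnd : s.Nodup)
    (hx : ∀ y ∈ s, y ≠ x → g' y = g y) (hxm : x ∈ s) :
    (s.map g').sum = (s.map g).sum + (g' x - g x) := by
  induction s with
  | nil => cases hxm
  | cons a s ih =>
    rcases List.mem_cons.mp hxm with rfl | hm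
    · have h : ∀ y ∈ s, g' y = g y := fun y hy =>
        hx y (List.mem_cons_of_mem _ hy) (fun h => (List.nodup_cons.mp hnd).1 (h ▸ hy))
      simp [List.map_congr_left h]; ring
    · have ha : g' a = g a := hx a List.mem_cons_self (fun h => (List.nodup_cons.mp hnd).1 (h ▸ hm))
      have h := ih (List.nodup_cons.mp hnd).2 (fun y hy hyne => hx y (List.mem_cons_of_mem _ hy) hyne) hm
      simp only [List.map_cons, List.sum_cons, h, ha]; ring

-- core: summing count(k) * w(k) over the distinct elements equals summing w over the list
lemma pv_count_sum (ks : List String) (w : String → Int) :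
    ((PySem.Set.ofList ks).map (fun k => (ks.count k : Int) * w k)).sum = (ks.map w).sum := by
  induction ks using List.reverseRecOn with
  | nil => simp [PySem.Set.ofList]
  | append_singleton l x ih =>
    rw [PySem.Set.ofList_append_singleton]
    by_cases hx : x ∈ l
    · rw [PySem.Set.add_of_mem (by simpa [PySem.Set.mem_ofList] using hx)]
      rw [pv_sum_update x (fun k => (l.count k : Int) * w k)
            (fun k => ((l ++ [x]).count k : Int) * w k) (PySem.Set.nodup_ofList l)
            (fun y _ hy => by
              have : ¬ x = y := fun h => hy h.symm
              simp [List.count_append, this])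
            (by simpa [PySem.Set.mem_ofList] using hx), ih]
      simp [List.count_append]
      ring
    · rw [PySem.Set.add_of_not_mem (by simpa [PySem.Set.mem_ofList] using hx)]
      have hcongr : ∀ k ∈ PySem.Set.ofList l,
          (fun k => ((l ++ [x]).count k : Int) * w k) k = (fun k => (l.count k : Int) * w k) k := by
        intro k hk
        have hne : ¬ x = k := fun h => hx (h ▸ ((PySem.Set.mem_ofList l k).mp hk))
        simp [List.count_append, hne]
      simp only [List.map_append, List.sum_append, List.map_congr_left hcongr, ih,
        List.map_singleton, List.sum_singleton]
      simp [List.count_eq_zero_of_not_mem hx]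

-- ===== VERDICT (by name: the statement is the Claim_ definition above) =====
theorem calculate_data_value_py_spec : Claim_equal_calculate_data_value_py := by
  intro data _ _
  unfold Spec_calculate_data_value_py calculate_data_value_py calculate_data_value_py_alt
  have hbody : (fun (base_value : Int) (record : List (String × String)) =>
      let t := (PySem.Dict.mk record).getD "type" ""
      if t = "medical_data" then base_value + 1500
      else if t = "financial_data" then base_value + 1000
      else if t = "credentials" then base_value + 500
      else if t = "personal_files" then base_value + 100
      else base_value + 50)
      = (fun base_value record => base_value + pvW ((PySem.Dict.mk record).getD "type" "")) := by
    funext b r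
    simp only [pvW]
    split_ifs <;> rfl
  rw [hbody, PySem.List.foldl_add data (fun r => pvW ((PySem.Dict.mk r).getD "type" "")) 0]
  have hcounts : data.foldl (fun d record =>
        let t := (PySem.Dict.mk record).getD "type" ""
        d.insert t (d.getD t 0 + 1)) PySem.Dict.empty
      = PySem.Dict.counter (data.map (fun r => (PySem.Dict.mk r).getD "type" "")) := by
    rw [← PySem.Dict.foldl_insert_getD_add_one_eq_counter, List.foldl_map]
  simp only [hcounts, PySem.Dict.items_counter]
  rw [PySem.List.foldl_add _ (fun p : String × Int => p.2 * pvValueMap.getD p.1 50) 0,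
    List.map_map]
  have hcomp : ((fun p : String × Int => p.2 * pvValueMap.getD p.1 50) ∘
      (fun k => (k, ((data.map (fun r => (PySem.Dict.mk r).getD "type" "")).count k : Int))))
      = fun k => ((data.map (fun r => (PySem.Dict.mk r).getD "type" "")).count k : Int) * pvW k := by
    funext k; simp [pvValueMap_getD]
  rw [hcomp, pv_count_sum (data.map (fun r => (PySem.Dict.mk r).getD "type" "")) pvW,
    List.map_map]
  simp [Function.comp_def]
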